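-- pv_equiv track=rewrite | github.com/bajco10/all-code | olympiads/zenit/21-22_krajske/e.py | optimalne_body
-- ===== SOURCE A (Python) =====
-- def optimalne_body(N, karticky):
--     dp = [[0] * N for _ in range(N)]
--
--     for i in range(N):
--         dp[i][i] = karticky[i]
--
--     for length in range(2, N + 1):
--         for i in range(N - length + 1):
--             j = i + length - 1
--             dp[i][j] = max(karticky[i] - dp[i + 1][j], karticky[j] - dp[i][j - 1])
--
--     return dp[0][N - 1]
-- ===== SOURCE B (Python) =====
-- def optimalne_body(N, karticky):
--     # top-down memoization driven by an explicit work stack (no table fill,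
--     # no deep recursion): intervals are solved on demand, post-order
--     memo = {}
--     stack = [(0, N - 1, False)]
--     while stack:
--         i, j, ready = stack.pop()
--         if (i, j) in memo:
--             continue
--         if i == j:
--             memo[(i, j)] = karticky[i]
--         elif ready:
--             memo[(i, j)] = max(karticky[i] - memo[(i + 1, j)],
--                                karticky[j] - memo[(i, j - 1)])
--         else:
--             stack.append((i, j, True))
--             stack.append((i + 1, j, False))
--             stack.append((i, j - 1, False))
--     return memo[(0, N - 1)]
-- ===== Notes on version B (the rewrite author's own statement) =====
-- stated objective: alternative
-- what changed: Replaces A's bottom-up length-ordered 2D table fill with on-demand top-down memoization: a dict memo and an explicit work stack evaluate intervals in DFS post-order starting from (0, N-1), instead of filling every cell of a table in length order.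
import Mathlib
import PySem

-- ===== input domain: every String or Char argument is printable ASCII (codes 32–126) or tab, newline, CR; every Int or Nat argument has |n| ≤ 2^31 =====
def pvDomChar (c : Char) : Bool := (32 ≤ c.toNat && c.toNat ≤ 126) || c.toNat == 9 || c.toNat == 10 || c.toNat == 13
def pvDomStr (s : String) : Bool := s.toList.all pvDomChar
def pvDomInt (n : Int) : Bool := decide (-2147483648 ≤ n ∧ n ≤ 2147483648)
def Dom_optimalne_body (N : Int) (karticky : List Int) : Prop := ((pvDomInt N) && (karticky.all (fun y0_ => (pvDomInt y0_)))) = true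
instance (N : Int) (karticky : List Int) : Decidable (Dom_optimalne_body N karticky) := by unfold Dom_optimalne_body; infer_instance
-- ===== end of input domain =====

-- B replaces A's bottom-up length-ordered 2D table fill by on-demand top-down
-- memoization: a dict memo plus an explicit work stack, DFS post-order from (0, N-1)
-- (alternative decomposition, same asymptotic cost).

-- ===== PORT A =====
-- dp[i][j] read / write on the 2D table (list of rows)
def pvGet2 (dp : List (List Int)) (i j : Nat) : Int := (dp.getD i []).getD j 0
def pvSet2 (dp : List (List Int)) (i j : Nat) (v : Int) : List (List Int) :=
  dp.set i ((dp.getD i []).set j v)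

def optimalne_body (N : Int) (karticky : List Int) : Int :=
  let n := N.toNat
  -- dp = [[0] * N for _ in range(N)]
  let dp0 := List.replicate n (List.replicate n 0)
  -- for i in range(N): dp[i][i] = karticky[i]   (index in range under Pre_)
  let dp1 := (List.range n).foldl (fun dp i => pvSet2 dp i i (karticky.getD i 0)) dp0
  -- for length in range(2, N+1): for i in range(N-length+1): j = i+length-1; dp[i][j] = ...
  let dp2 := (List.range' 2 (n - 1)).foldl (fun dp length =>
      (List.range (n - length + 1)).foldl (fun dp i =>
        let j := i + length - 1
        pvSet2 dp i j (max (karticky.getD i 0 - pvGet2 dp (i+1) j)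
                           (karticky.getD j 0 - pvGet2 dp i (j-1)))) dp) dp1
  -- return dp[0][N-1]
  pvGet2 dp2 0 (n - 1)

-- ===== PORT B =====
-- the while loop of Source B: stack head = Python's stack top; fuel only makes the loop
-- total (3·2^N bounds the iteration count, proved below; the 0-fuel arm is unreachable
-- under Pre_).  memo[...] lookups use .getD 0: a KeyError is unreachable (children are
-- memoized before a 'ready' entry resurfaces, see the invariant lemma runB_consume).
def runB (k : List Int) : Nat → List (Int × Int × Bool) → PySem.Dict (Int × Int) Int → PySem.Dict (Int × Int) Int
  | _, [], memo => memo
  | 0, _ :: _, memo => memo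
  | f + 1, (i, j, ready) :: rest, memo =>
    if memo.contains (i, j) then
      runB k f rest memo
    else if i = j then
      runB k f rest (memo.insert (i, j) ((PySem.List.pyGet? k i).getD 0))
    else if ready then
      runB k f rest (memo.insert (i, j)
        (max ((PySem.List.pyGet? k i).getD 0 - (memo.get? (i + 1, j)).getD 0)
             ((PySem.List.pyGet? k j).getD 0 - (memo.get? (i, j - 1)).getD 0)))
    else
      runB k f ((i, j - 1, false) :: (i + 1, j, false) :: (i, j, true) :: rest) memo

def optimalne_body_alt (N : Int) (karticky : List Int) : Int :=
  -- memo = {}; stack = [(0, N-1, False)]; while stack: …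
  let memo := runB karticky (3 * 2 ^ N.toNat) [(0, N - 1, false)] PySem.Dict.empty
  -- return memo[(0, N-1)]   (present under Pre_)
  (memo.get? (0, N - 1)).getD 0

-- ===== PRECONDITION & SPEC =====
-- Pre_ excludes N < 1 (A raises IndexError at dp[0][N-1] on an empty table) and
-- N > len(karticky) (A raises IndexError at karticky[i]); A raises on every excluded
-- input, so nothing is claimed there.
def Pre_optimalne_body (N : Int) (karticky : List Int) : Prop :=
  1 ≤ N ∧ N ≤ (karticky.length : Int)
instance (N : Int) (karticky : List Int) : Decidable (Pre_optimalne_body N karticky) := by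
  unfold Pre_optimalne_body; infer_instance
def pvWitness_optimalne_body : Int × List Int := (3, [5, -2, 7])

def Spec_optimalne_body (N : Int) (karticky : List Int) (out : Int) : Prop := out = optimalne_body_alt N karticky
instance (N : Int) (karticky : List Int) (out : Int) : Decidable (Spec_optimalne_body N karticky out) := by unfold Spec_optimalne_body; infer_instance

-- ===== CLAIM (what is proved, stated in full; the proofs are below) =====
def Claim_equal_optimalne_body : Prop := ∀ (N : Int) (karticky : List Int), Dom_optimalne_body N karticky → Pre_optimalne_body N karticky → Spec_optimalne_body N karticky (optimalne_body N karticky)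

-- ===== LEMMAS AND PROOFS =====

-- the interval value: gval k L i = optimal difference on the L cards starting at i
def gval (k : List Int) : Nat → Nat → Int
  | 0, _ => 0
  | L+1, i => max (k.getD i 0 - gval k L (i+1)) (k.getD (i+L) 0 - gval k L i)

theorem gval_one (k : List Int) (i : Nat) : gval k 1 i = k.getD i 0 := by
  simp [gval]

-- ----- table shape and cell access (A side) -----
def Shape (n : Nat) (dp : List (List Int)) : Prop :=
  dp.length = n ∧ ∀ r ∈ dp, r.length = n

theorem shape_set2 {n : Nat} {dp : List (List Int)} (h : Shape n dp) (i j : Nat) (v : Int) :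
    Shape n (pvSet2 dp i j v) := by
  obtain ⟨h1, h2⟩ := h
  by_cases hi : i < dp.length
  · refine ⟨by simp [pvSet2, h1], ?_⟩
    intro r hr
    rcases List.mem_or_eq_of_mem_set hr with h | h
    · exact h2 r h
    · subst h
      rw [List.length_set, List.getD_eq_getElem _ _ hi]
      exact h2 _ (List.getElem_mem hi)
  · unfold pvSet2
    rw [List.set_eq_of_length_le (by omega)]
    exact ⟨h1, h2⟩

theorem get2_set2_same {n : Nat} {dp : List (List Int)} (h : Shape n dp)
    {i j : Nat} (hi : i < n) (hj : j < n) (v : Int) :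
    pvGet2 (pvSet2 dp i j v) i j = v := by
  obtain ⟨h1, h2⟩ := h
  have hi' : i < dp.length := by omega
  have hrow : (dp.getD i []).length = n := by
    rw [List.getD_eq_getElem _ _ hi']; exact h2 _ (List.getElem_mem hi')
  unfold pvGet2 pvSet2
  simp only [List.getD_eq_getElem?_getD] at hrow ⊢
  rw [List.getElem?_set_self (by omega), Option.getD_some,
    List.getElem?_set_self (by omega), Option.getD_some]

theorem get2_set2_ne {dp : List (List Int)} {i j i' j' : Nat}
    (h : i ≠ i' ∨ j ≠ j') (v : Int) :
    pvGet2 (pvSet2 dp i j v) i' j' = pvGet2 dp i' j' := by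
  unfold pvGet2 pvSet2
  simp only [List.getD_eq_getElem?_getD]
  by_cases hii : i = i'
  · subst hii
    have hj : j ≠ j' := by tauto
    by_cases hi : i < dp.length
    · rw [List.getElem?_set_self (by omega), Option.getD_some, List.getElem?_set_ne hj]
    · rw [List.set_eq_of_length_le (by omega)]
  · rw [List.getElem?_set_ne hii]

-- ----- A side: the table fill computes gval -----
def InvA (k : List Int) (n L : Nat) (dp : List (List Int)) : Prop :=
  Shape n dp ∧ ∀ l i, 1 ≤ l → l ≤ L → i + l ≤ n → pvGet2 dp i (i + l - 1) = gval k l i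

-- first loop: the diagonal
theorem loop1_inv (k : List Int) (n : Nat) :
    InvA k n 1 ((List.range n).foldl (fun dp i => pvSet2 dp i i (k.getD i 0))
      (List.replicate n (List.replicate n 0))) := by
  suffices H : ∀ m : Nat, m ≤ n →
      Shape n ((List.range m).foldl (fun dp i => pvSet2 dp i i (k.getD i 0))
        (List.replicate n (List.replicate n 0))) ∧
      ∀ i < m, pvGet2 ((List.range m).foldl (fun dp i => pvSet2 dp i i (k.getD i 0))
        (List.replicate n (List.replicate n 0))) i i = k.getD i 0 by
    obtain ⟨hs, hv⟩ := H n le_rfl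
    refine ⟨hs, ?_⟩
    intro l i h1 h2 h3
    have hl : l = 1 := by omega
    subst hl
    simpa [gval_one] using hv i (by omega)
  intro m
  induction m with
  | zero =>
    intro _
    exact ⟨⟨by simp, by intro r hr; simp at hr; simp [hr]⟩, by omega⟩
  | succ m ih =>
    intro hm
    obtain ⟨hs, hv⟩ := ih (by omega)
    rw [List.range_succ, List.foldl_append]
    simp only [List.foldl_cons, List.foldl_nil]
    refine ⟨shape_set2 hs _ _ _, ?_⟩
    intro i hi
    rcases Nat.lt_or_ge i m with h | h
    · rw [get2_set2_ne (Or.inl (by omega))]; exact hv i h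
    · have : i = m := by omega
      subst this
      exact get2_set2_same hs (by omega) (by omega) _

-- inner loop: one pass at interval length L fills all intervals of length L
theorem inner_inv (k : List Int) (n L : Nat) (hL : 2 ≤ L) (hLn : L ≤ n)
    (dp : List (List Int)) (h : InvA k n (L - 1) dp) :
    InvA k n L ((List.range (n - L + 1)).foldl (fun dp i =>
      pvSet2 dp i (i + L - 1) (max (k.getD i 0 - pvGet2 dp (i+1) (i + L - 1))
        (k.getD (i + L - 1) 0 - pvGet2 dp i (i + L - 1 - 1)))) dp) := by
  obtain ⟨M, rfl⟩ : ∃ M, L = M + 2 := ⟨L - 2, by omega⟩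
  suffices H : ∀ m : Nat, m ≤ n - (M + 2) + 1 →
      InvA k n (M + 1) ((List.range m).foldl (fun dp i =>
        pvSet2 dp i (i + (M + 2) - 1) (max (k.getD i 0 - pvGet2 dp (i+1) (i + (M + 2) - 1))
          (k.getD (i + (M + 2) - 1) 0 - pvGet2 dp i (i + (M + 2) - 1 - 1)))) dp) ∧
      ∀ i < m, pvGet2 ((List.range m).foldl (fun dp i =>
        pvSet2 dp i (i + (M + 2) - 1) (max (k.getD i 0 - pvGet2 dp (i+1) (i + (M + 2) - 1))
          (k.getD (i + (M + 2) - 1) 0 - pvGet2 dp i (i + (M + 2) - 1 - 1)))) dp) i (i + (M + 2) - 1)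
        = gval k (M + 2) i by
    obtain ⟨⟨hs, hshort⟩, hnew⟩ := H (n - (M + 2) + 1) le_rfl
    refine ⟨hs, ?_⟩
    intro l i h1 h2 h3
    rcases Nat.lt_or_ge l (M + 2) with hlt | hge
    · exact hshort l i h1 (by omega) h3
    · have : l = M + 2 := by omega
      subst this
      exact hnew i (by omega)
  intro m
  induction m with
  | zero => exact fun _ => ⟨by simpa using h, fun i hi => absurd hi (by omega)⟩
  | succ m ih =>
    intro hm
    obtain ⟨⟨hs, hval⟩, hnew⟩ := ih (by omega)
    rw [List.range_succ, List.foldl_append]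
    simp only [List.foldl_cons, List.foldl_nil]
    refine ⟨⟨shape_set2 hs _ _ _, ?_⟩, ?_⟩
    · intro l i h1 h2 h3
      by_cases hmi : m = i
      · subst hmi
        rw [get2_set2_ne (Or.inr (by omega))]
        exact hval l m h1 h2 h3
      · rw [get2_set2_ne (Or.inl hmi)]
        exact hval l i h1 h2 h3
    · intro i hi
      rcases Nat.lt_or_ge i m with hlt | hge
      · rw [get2_set2_ne (Or.inl (by omega))]
        exact hnew i hlt
      · have him : i = m := by omega
        subst him
        rw [get2_set2_same hs (by omega) (by omega)]
        have e1 : i + 1 + (M + 1) - 1 = i + (M + 2) - 1 := by omega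
        have r1 := hval (M + 1) (i + 1) (by omega) le_rfl (by omega)
        rw [e1] at r1
        have e2 : i + (M + 1) - 1 = i + (M + 2) - 1 - 1 := by omega
        have r2 := hval (M + 1) i (by omega) le_rfl (by omega)
        rw [e2] at r2
        rw [r1, r2, show i + (M + 2) - 1 = i + (M + 1) from by omega]
        show _ = gval k ((M + 1) + 1) i
        conv_rhs => rw [gval]

-- outer loop over the lengths 2 .. m+1
theorem loop2_inv (k : List Int) (n : Nat) (dp : List (List Int)) (h : InvA k n 1 dp) :
    ∀ m : Nat, m ≤ n - 1 →
      InvA k n (m + 1) ((List.range' 2 m).foldl (fun dp length =>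
        (List.range (n - length + 1)).foldl (fun dp i =>
          pvSet2 dp i (i + length - 1) (max (k.getD i 0 - pvGet2 dp (i+1) (i + length - 1))
            (k.getD (i + length - 1) 0 - pvGet2 dp i (i + length - 1 - 1)))) dp) dp) := by
  intro m
  induction m with
  | zero => exact fun _ => h
  | succ m ih =>
    intro hm
    rw [List.range'_1_concat, List.foldl_append]
    simp only [List.foldl_cons, List.foldl_nil]
    rw [show m + 1 + 1 = 2 + m from by omega]
    exact inner_inv k n (2 + m) (by omega) (by omega) _ (by
      have h' := ih (by omega)
      have e : 2 + m - 1 = m + 1 := by omega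
      rw [e]
      exact h')

-- ----- B side: the stack machine fills memo with gval values -----

-- fuel needed to fully resolve one unexpanded stack entry of span L
def FB (L : Nat) : Nat := 3 * 2 ^ L - 2

-- every memo entry is a well-bounded interval mapped to its gval value
def GoodM (n : Nat) (k : List Int) (m : PySem.Dict (Int × Int) Int) : Prop :=
  ∀ p v, m.get? p = some v →
    0 ≤ p.1 ∧ p.1 ≤ p.2 ∧ p.2 < (n : Int) ∧ v = gval k ((p.2 - p.1).toNat + 1) p.1.toNat

theorem pyGet_getD (k : List Int) (i : Int) (h0 : 0 ≤ i) (_h1 : i < (k.length : Int)) :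
    (PySem.List.pyGet? k i).getD 0 = k.getD i.toNat 0 := by
  rw [PySem.List.pyGet?_of_nonneg k h0, List.getD_eq_getElem?_getD]

theorem goodM_insert {n : Nat} {k : List Int} {m : PySem.Dict (Int × Int) Int}
    (h : GoodM n k m) {i j : Int} (h0 : 0 ≤ i) (h1 : i ≤ j) (h2 : j < (n : Int))
    {v : Int} (hv : v = gval k ((j - i).toNat + 1) i.toNat) :
    GoodM n k (m.insert (i, j) v) := by
  intro p w hw
  rw [PySem.Dict.get?_insert] at hw
  split at hw
  · rename_i hp
    subst hp
    cases hw
    exact ⟨h0, h1, h2, hv⟩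
  · exact h p w hw

-- processing one unexpanded entry (i, j, false): within FB (j-i) steps it is consumed,
-- memo grows monotonically, stays Good and ends up containing (i, j)
theorem runB_consume (k : List Int) (n : Nat) (hn : (n : Int) ≤ (k.length : Int)) :
    ∀ (L : Nat) (i j : Int) (m : PySem.Dict (Int × Int) Int)
      (rest : List (Int × Int × Bool)) (f : Nat),
      GoodM n k m → 0 ≤ i → i ≤ j → j < (n : Int) → (j - i).toNat = L → FB L ≤ f →
      ∃ m' f', runB k f ((i, j, false) :: rest) m = runB k f' rest m' ∧
        GoodM n k m' ∧ (∀ p v, m.get? p = some v → m'.get? p = some v) ∧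
        (m'.get? (i, j)).isSome = true ∧ f ≤ f' + FB L ∧ f' < f := by
  intro L
  induction L with
  | zero =>
    intro i j m rest f hg h0 h1 h2 hL hf
    have hij : i = j := by omega
    subst hij
    have hf1 : 1 ≤ f := by simpa [FB] using hf
    obtain ⟨f0, rfl⟩ : ∃ f0, f = f0 + 1 := ⟨f - 1, by omega⟩
    by_cases hc : m.contains (i, i)
    · refine ⟨m, f0, by simp [runB, hc], hg, fun p v h => h, ?_, by simp [FB], by omega⟩
      rw [← PySem.Dict.contains_eq_isSome_get?]; exact hc
    · refine ⟨m.insert (i, i) ((PySem.List.pyGet? k i).getD 0), f0,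
        by simp [runB, hc], ?_, ?_, ?_, by simp [FB], by omega⟩
      · refine goodM_insert hg h0 le_rfl h2 ?_
        rw [pyGet_getD k i h0 (by omega)]
        simp [gval_one]
      · intro p v h
        rw [PySem.Dict.get?_insert]
        split
        · rename_i hp
          subst hp
          rw [PySem.Dict.contains_eq_isSome_get?] at hc
          simp [h] at hc
        · exact h
      · simp [PySem.Dict.get?_insert_self]
  | succ L ih =>
    intro i j m rest f hg h0 h1 h2 hL hf
    have h2L : 1 ≤ 2 ^ L := Nat.one_le_two_pow
    have hFB : FB (L + 1) = 2 * FB L + 2 := by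
      simp only [FB, pow_succ]; omega
    have hij : i < j := by omega
    obtain ⟨f0, rfl⟩ : ∃ f0, f = f0 + 1 := ⟨f - 1, by
      have := hFB; omega⟩
    by_cases hc : m.contains (i, j)
    · refine ⟨m, f0, by simp [runB, hc], hg, fun p v h => h, ?_, by omega, by omega⟩
      rw [← PySem.Dict.contains_eq_isSome_get?]; exact hc
    · -- expand: push (i, j, true), (i+1, j, false), (i, j-1, false)
      have hstep : runB k (f0 + 1) ((i, j, false) :: rest) m =
          runB k f0 ((i, j - 1, false) :: (i + 1, j, false) :: (i, j, true) :: rest) m := by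
        simp [runB, hc, show ¬ i = j by omega]
      -- consume (i, j-1, false)
      obtain ⟨m1, f1, e1, hg1, mono1, hs1, hb1, hlt1⟩ :=
        ih i (j - 1) m ((i + 1, j, false) :: (i, j, true) :: rest) f0 hg h0 (by omega)
          (by omega) (by omega) (by omega)
      -- consume (i+1, j, false)
      obtain ⟨m2, f2, e2, hg2, mono2, hs2, hb2, hlt2⟩ :=
        ih (i + 1) j m1 ((i, j, true) :: rest) f1 hg1 (by omega) (by omega) h2
          (by omega) (by omega)
      have hf2 : 1 ≤ f2 := by omega
      obtain ⟨f3, rfl⟩ : ∃ f3, f2 = f3 + 1 := ⟨f2 - 1, by omega⟩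
      -- now the top is (i, j, true) and both children are memoized
      by_cases hc2 : m2.contains (i, j)
      · refine ⟨m2, f3, ?_, hg2, fun p v h => mono2 p v (mono1 p v h), ?_, by omega, by omega⟩
        · rw [hstep, e1, e2]; simp [runB, hc2]
        · rw [← PySem.Dict.contains_eq_isSome_get?]; exact hc2
      · obtain ⟨w1, hw1⟩ := Option.isSome_iff_exists.mp hs2
        obtain ⟨w2, hw2⟩ := Option.isSome_iff_exists.mp (by
          rw [Option.isSome_iff_exists]
          obtain ⟨w, hw⟩ := Option.isSome_iff_exists.mp hs1
          exact ⟨w, mono2 _ _ hw⟩ : (m2.get? (i, j - 1)).isSome = true)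
        have hv1 : w1 = gval k (L + 1) (i.toNat + 1) := by
          have := (hg2 _ _ hw1).2.2.2
          rw [this]
          congr 1
          · omega
          · omega
        have hv2 : w2 = gval k (L + 1) i.toNat := by
          have := (hg2 _ _ hw2).2.2.2
          rw [this]
          congr 1
          omega
        refine ⟨m2.insert (i, j)
            (max ((PySem.List.pyGet? k i).getD 0 - (m2.get? (i + 1, j)).getD 0)
                 ((PySem.List.pyGet? k j).getD 0 - (m2.get? (i, j - 1)).getD 0)), f3,
          ?_, ?_, ?_, by simp [PySem.Dict.get?_insert_self], by omega, by omega⟩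
        · rw [hstep, e1, e2]; simp [runB, hc2, show ¬ i = j by omega]
        · refine goodM_insert hg2 h0 (by omega) h2 ?_
          rw [hw1, hw2, hv1, hv2, Option.getD_some, Option.getD_some,
            pyGet_getD k i h0 (by omega), pyGet_getD k j (by omega) (by omega),
            show (j - i).toNat + 1 = (L + 1) + 1 from by omega,
            show j.toNat = i.toNat + (L + 1) from by omega]
          conv_rhs => rw [gval]
        · intro p v h
          rw [PySem.Dict.get?_insert]
          split
          · rename_i hp
            subst hp
            rw [PySem.Dict.contains_eq_isSome_get?] at hc2
            simp [mono2 _ _ (mono1 _ _ h)] at hc2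
          · exact mono2 _ _ (mono1 _ _ h)

-- ----- the two ports -----
theorem portA_eq_gval (k : List Int) (N : Int) (h1 : 1 ≤ N) :
    optimalne_body N k = gval k N.toNat 0 := by
  unfold optimalne_body
  simp only []
  have hn : 1 ≤ N.toNat := by omega
  have base : InvA k N.toNat 1 ((List.range N.toNat).foldl
      (fun dp i => pvSet2 dp i i (k.getD i 0))
      (List.replicate N.toNat (List.replicate N.toNat 0))) := loop1_inv k N.toNat
  have fin := loop2_inv k N.toNat _ base (N.toNat - 1) le_rfl
  obtain ⟨_, hv⟩ := fin
  have := hv N.toNat 0 (by omega) (by omega) (by omega)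
  simpa using this

theorem portB_eq_gval (k : List Int) (N : Int) (h1 : 1 ≤ N) (h2 : N ≤ (k.length : Int)) :
    optimalne_body_alt N k = gval k N.toNat 0 := by
  unfold optimalne_body_alt
  have hg : GoodM N.toNat k PySem.Dict.empty := by
    intro p v h
    simp [PySem.Dict.get?_empty] at h
  have hfuel : FB ((N - 1 - 0).toNat) ≤ 3 * 2 ^ N.toNat := by
    have : 2 ^ (N - 1 - 0).toNat ≤ 2 ^ N.toNat :=
      Nat.pow_le_pow_right (by omega) (by omega)
    simp only [FB]; omega
  obtain ⟨m', f', e, hg', _, hs, _, _⟩ :=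
    runB_consume k N.toNat (by omega) ((N - 1 - 0).toNat) 0 (N - 1)
      PySem.Dict.empty [] (3 * 2 ^ N.toNat) hg (by omega) (by omega) (by omega) rfl hfuel
  obtain ⟨v, hv⟩ := Option.isSome_iff_exists.mp hs
  have hval := (hg' _ _ hv).2.2.2
  simp only []
  rw [e, show runB k f' [] m' = m' from by simp [runB], hv, Option.getD_some, hval,
    show ((N : Int) - 1 - 0).toNat + 1 = N.toNat from by omega,
    show ((0 : Int)).toNat = 0 from rfl]

-- ===== VERDICT (by name: the statement is the Claim_ definition above) =====
theorem optimalne_body_spec : Claim_equal_optimalne_body := by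
  intro N k _ hpre
  unfold Spec_optimalne_body
  rw [portA_eq_gval k N hpre.1, portB_eq_gval k N hpre.1 hpre.2]
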